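-- pv_equiv track=rewrite | github.com/weizhenFrank/DeepPhospho | deepphospho/mskit/calc/intensity.py | keep_top_n_inten
-- ===== SOURCE A (Python) =====
-- def keep_top_n_inten(inten, top_n=25):
--     """
--     可以作为 low inten filter 加入 normalize_intensity
--     """
--     if len(inten) <= top_n:
--         return inten
--     if isinstance(inten, dict):
--         top_n_inten = sorted(inten.values(), reverse=True)[top_n]
--         return {frag: inten_value for frag, inten_value in inten.items() if inten_value > top_n_inten}
--     elif isinstance(inten, list):
--         top_n_inten = sorted(inten, reverse=True)[top_n]
--         return [inten_value for inten_value in inten if inten_value > top_n_inten]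
--     else:
--         raise
-- ===== SOURCE B (Python) =====
-- def keep_top_n_inten(inten, top_n=25):
--     n = len(inten)
--     if n <= top_n:
--         return inten
--     # threshold = top_n-th largest = (n-1-top_n)-th smallest, found by quickselect
--     def kth_smallest(arr, k):
--         while True:
--             pivot = arr[len(arr) // 2]
--             lo = [x for x in arr if x < pivot]
--             eq = [x for x in arr if x == pivot]
--             if k < len(lo):
--                 arr = lo
--             elif k < len(lo) + len(eq):
--                 return pivot
--             else:
--                 k -= len(lo) + len(eq)
--                 arr = [x for x in arr if x > pivot]
--     t = kth_smallest(inten, n - 1 - top_n)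
--     return [x for x in inten if x > t]
-- ===== Notes on version B (the rewrite author's own statement) =====
-- stated objective: faster
-- what changed: Replaces the full descending sort used to find the top-n-th value by an average-O(n) quickselect (3-way partition) for the (n-1-top_n)-th smallest element, then filters once.
-- outside the precondition, e.g. on keep_top_n_inten([3, 1, 2], -1): A returns [3, 2], B raises IndexError
import Mathlib
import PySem

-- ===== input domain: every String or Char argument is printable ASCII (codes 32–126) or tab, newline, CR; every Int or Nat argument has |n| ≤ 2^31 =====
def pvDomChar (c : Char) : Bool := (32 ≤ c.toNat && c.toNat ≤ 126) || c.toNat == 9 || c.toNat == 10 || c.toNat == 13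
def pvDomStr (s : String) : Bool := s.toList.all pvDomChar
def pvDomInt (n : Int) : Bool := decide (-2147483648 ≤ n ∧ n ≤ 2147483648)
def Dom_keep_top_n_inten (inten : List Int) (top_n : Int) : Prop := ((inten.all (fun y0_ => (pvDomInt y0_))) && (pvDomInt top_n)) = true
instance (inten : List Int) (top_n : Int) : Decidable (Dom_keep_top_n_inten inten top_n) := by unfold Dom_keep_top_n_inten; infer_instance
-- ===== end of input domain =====

-- B replaces A's full descending sort (used only to read off the top_n-th largest value)
-- by a quickselect for the (n-1-top_n)-th smallest element, then one filter pass.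

-- ===== PORT A =====
def keep_top_n_inten (inten : List Int) (top_n : Int) : List Int :=
  if (inten.length : Int) ≤ top_n then inten
  else
    match PySem.List.pyGet? (PySem.List.sorted inten (fun x => x) true) top_n with
    | none => []   -- Python IndexError (top_n < -len); excluded by Pre_
    | some t => inten.filter (fun v => t < v)

-- ===== PORT B =====
-- quickselect: k-th smallest (0-based) of arr; none = Python IndexError (k out of range)
def kthSmallest (arr : List Int) (k : Int) : Option Int :=
  -- len(arr)//2: Lean's Int division equals Python's floor division here (nonnegative operands)
  match h : PySem.List.pyGet? arr ((arr.length : Int) / 2) with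
  | none => none   -- arr exhausted: Python's arr[len(arr)//2] raises IndexError
  | some pivot =>
    let lo := arr.filter (fun x => x < pivot)
    let eq := arr.filter (fun x => x == pivot)
    if k < (lo.length : Int) then kthSmallest lo k
    else if k < (lo.length : Int) + (eq.length : Int) then some pivot
    else kthSmallest (arr.filter (fun x => pivot < x)) (k - lo.length - eq.length)
termination_by arr.length
decreasing_by
  all_goals
    simp only [List.length_unattach]
    rw [← List.length_attach (l := arr)]
    refine List.length_filter_lt_length_iff_exists.mpr
      ⟨⟨pivot, PySem.List.mem_of_pyGet?_eq_some _ h⟩, List.mem_attach _ _, by simp⟩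

def keep_top_n_inten_alt (inten : List Int) (top_n : Int) : List Int :=
  let n : Int := inten.length
  if n ≤ top_n then inten
  else
    match kthSmallest inten (n - 1 - top_n) with
    | none => []   -- unreachable under Pre_ (quickselect raises only for k out of range)
    | some t => inten.filter (fun x => t < x)

-- ===== PRECONDITION & SPEC =====
-- Pre_ excludes negative top_n: there A raises IndexError when top_n < -len, and for
-- -len ≤ top_n < 0 A's value is a negative-index wraparound on the sorted list, where
-- B's quickselect (index n-1-top_n out of range) itself raises IndexError.
def Pre_keep_top_n_inten (inten : List Int) (top_n : Int) : Prop := 0 ≤ top_n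
instance (inten : List Int) (top_n : Int) : Decidable (Pre_keep_top_n_inten inten top_n) := by
  unfold Pre_keep_top_n_inten; infer_instance
def pvWitness_keep_top_n_inten : List Int × Int := ([5, 1, 4, 2, 3, 2], 2)

def Spec_keep_top_n_inten (inten : List Int) (top_n : Int) (out : List Int) : Prop := out = keep_top_n_inten_alt inten top_n
instance (inten : List Int) (top_n : Int) (out : List Int) : Decidable (Spec_keep_top_n_inten inten top_n out) := by unfold Spec_keep_top_n_inten; infer_instance

-- ===== CLAIM (what is proved, stated in full; the proofs are below) =====
def Claim_equal_keep_top_n_inten : Prop := ∀ (inten : List Int) (top_n : Int), Dom_keep_top_n_inten inten top_n → Pre_keep_top_n_inten inten top_n → Spec_keep_top_n_inten inten top_n (keep_top_n_inten inten top_n)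

-- ===== LEMMAS AND PROOFS =====

-- the three filters partition arr, up to permutation
lemma partition_perm (arr : List Int) (p : Int) :
    (arr.filter (fun x => x < p) ++ arr.filter (fun x => x == p) ++ arr.filter (fun x => p < x)).Perm arr := by
  induction arr with
  | nil => simp
  | cons a t ih =>
    rcases lt_trichotomy a p with h | h | h
    · have h2 : a ≠ p := by omega
      have h3 : ¬ p < a := by omega
      simp only [List.filter_cons, h, h2, h3, decide_true, decide_false, if_true, if_false,
        beq_iff_eq, List.append_assoc, List.cons_append]
      rw [← List.append_assoc]
      exact ih.cons a
    · subst h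
      have h1 : ¬ a < a := lt_irrefl a
      simp only [List.filter_cons, h1, decide_false, beq_self_eq_true, if_true,
        List.append_assoc, List.cons_append]
      refine (List.perm_middle).trans ?_
      rw [← List.append_assoc]
      exact ih.cons a
    · have h1 : ¬ a < p := by omega
      have h2 : a ≠ p := by omega
      simp only [List.filter_cons, h1, h2, h, decide_true, decide_false, if_true, if_false,
        beq_iff_eq, List.append_assoc]
      refine ((List.Perm.append_left _ List.perm_middle).trans List.perm_middle).trans ?_
      rw [← List.append_assoc]
      exact ih.cons a

-- sorted(arr) splits at a pivot into sorted lows, the equals, and sorted highs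
lemma sorted_partition (arr : List Int) (p : Int) :
    PySem.List.sorted arr (fun x => x) false =
      PySem.List.sorted (arr.filter (fun x => x < p)) (fun x => x) false
      ++ arr.filter (fun x => x == p)
      ++ PySem.List.sorted (arr.filter (fun x => p < x)) (fun x => x) false := by
  apply PySem.List.sorted_id_eq_of_perm_of_pairwise
  · refine List.Perm.trans ?_ (partition_perm arr p)
    exact ((PySem.List.sorted_perm _ _ _).append
      (List.Perm.refl _)).append (PySem.List.sorted_perm _ _ _)
  · have hlo : ∀ x ∈ PySem.List.sorted (arr.filter (fun x => x < p)) (fun x => x) false, x < p := by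
      intro x hx
      have := (PySem.List.mem_sorted _ _ _ _).mp hx
      simpa using (List.mem_filter.mp this).2
    have heq : ∀ x ∈ arr.filter (fun x => x == p), x = p := by
      intro x hx
      simpa using (List.mem_filter.mp hx).2
    have hgt : ∀ x ∈ PySem.List.sorted (arr.filter (fun x => p < x)) (fun x => x) false, p < x := by
      intro x hx
      have := (PySem.List.mem_sorted _ _ _ _).mp hx
      simpa using (List.mem_filter.mp this).2
    rw [List.pairwise_append, List.pairwise_append]
    refine ⟨⟨PySem.List.sorted_pairwise _ _, ?_, ?_⟩, PySem.List.sorted_pairwise _ _, ?_⟩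
    · exact List.pairwise_of_forall_mem_list (fun a ha b hb => by rw [heq a ha, heq b hb])
    · intro a ha b hb
      rw [heq b hb]; exact le_of_lt (hlo a ha)
    · intro a ha b hb
      have hb' := hgt b hb
      rcases List.mem_append.mp ha with h | h
      · exact le_of_lt (lt_trans (hlo a h) hb')
      · rw [heq a h]; exact le_of_lt hb'

-- quickselect returns sorted(arr)[k] for in-range k
lemma kth_correct (arr : List Int) (k : Int) (h0 : 0 ≤ k) (hk : k < (arr.length : Int)) :
    kthSmallest arr k = (PySem.List.sorted arr (fun x => x) false)[k.toNat]? := by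
  induction hn : arr.length using Nat.strong_induction_on generalizing arr k with
  | _ n ih =>
  rw [kthSmallest]
  cases h : PySem.List.pyGet? arr ((arr.length : Int) / 2) with
  | none =>
    exfalso
    rw [PySem.List.pyGet?_eq_none_iff] at h
    apply h; constructor <;> omega
  | some pivot =>
    simp only []
    have hm : pivot ∈ arr := PySem.List.mem_of_pyGet?_eq_some _ h
    have hpart := sorted_partition arr pivot
    have hperm := partition_perm arr pivot
    have hLlen : (PySem.List.sorted (arr.filter (fun x => decide (x < pivot))) (fun x => x) false).length
        = (arr.filter (fun x => decide (x < pivot))).length := PySem.List.length_sorted _ _ _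
    have hGlen : (PySem.List.sorted (arr.filter (fun x => decide (pivot < x))) (fun x => x) false).length
        = (arr.filter (fun x => decide (pivot < x))).length := PySem.List.length_sorted _ _ _
    have hsum : (arr.filter (fun x => decide (x < pivot))).length
        + (arr.filter (fun x => x == pivot)).length
        + (arr.filter (fun x => decide (pivot < x))).length = arr.length := by
      have := hperm.length_eq
      simp only [List.length_append] at this
      omega
    have hlo_lt : (arr.filter (fun x => decide (x < pivot))).length < arr.length :=
      List.length_filter_lt_length_iff_exists.mpr ⟨pivot, hm, by simp⟩
    have heq_pos : 0 < (arr.filter (fun x => x == pivot)).length :=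
      List.length_pos_of_mem (List.mem_filter.mpr ⟨hm, by simp⟩)
    split_ifs with h1 h2
    · -- recurse into the lows
      rw [ih (arr.filter (fun x => decide (x < pivot))).length (by omega) _ k h0 (by exact_mod_cast h1) rfl]
      rw [hpart, List.getElem?_append_left, List.getElem?_append_left]
      · omega
      · simp only [List.length_append]; omega
    · -- pivot is the answer
      rw [hpart]
      rw [List.getElem?_append_left (by simp only [List.length_append]; omega)]
      rw [List.getElem?_append_right (by omega)]
      have hidx : k.toNat - (PySem.List.sorted (arr.filter (fun x => decide (x < pivot))) (fun x => x) false).length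
          < (arr.filter (fun x => x == pivot)).length := by omega
      rw [List.getElem?_eq_getElem hidx]
      have hmem := List.getElem_mem hidx
      have hv := (List.mem_filter.mp hmem).2
      simp only [beq_iff_eq] at hv
      rw [hv]
    · -- recurse into the highs
      have hk' : k - (arr.filter (fun x => decide (x < pivot))).length
          - (arr.filter (fun x => x == pivot)).length
          < ((arr.filter (fun x => decide (pivot < x))).length : Int) := by omega
      rw [ih (arr.filter (fun x => decide (pivot < x))).length (by omega) _ _ (by omega) hk' rfl]
      rw [hpart]
      rw [List.getElem?_append_right (by simp only [List.length_append]; omega)]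
      congr 1
      simp only [List.length_append]
      omega

-- Python's reverse=True sort of ints is the reverse of the ascending sort
lemma sorted_rev_eq_reverse (arr : List Int) :
    PySem.List.sorted arr (fun x => x) true = (PySem.List.sorted arr (fun x => x) false).reverse := by
  have h : (PySem.List.sorted arr (fun x => x) true).reverse
      = PySem.List.sorted arr (fun x => x) false := by
    apply PySem.List.eq_of_perm_of_pairwise_le_of_injective (fun x : Int => x)
      (fun a b hab => hab)
    · exact ((PySem.List.sorted arr (fun x => x) true).reverse_perm.trans
        (PySem.List.sorted_perm _ _ _)).trans (PySem.List.sorted_perm _ _ _).symm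
    · rw [List.pairwise_reverse]
      exact PySem.List.sorted_pairwise_rev _ _
    · exact PySem.List.sorted_pairwise _ _
  calc PySem.List.sorted arr (fun x => x) true
      = (PySem.List.sorted arr (fun x => x) true).reverse.reverse := by rw [List.reverse_reverse]
    _ = (PySem.List.sorted arr (fun x => x) false).reverse := by rw [h]

-- ===== VERDICT (by name: the statement is the Claim_ definition above) =====
theorem keep_top_n_inten_spec : Claim_equal_keep_top_n_inten := by
  intro inten top_n _ hpre
  unfold Spec_keep_top_n_inten keep_top_n_inten keep_top_n_inten_alt
  by_cases hle : (inten.length : Int) ≤ top_n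
  · simp [hle]
  · simp only [hle, if_false]
    have h0 : (0 : Int) ≤ top_n := hpre
    have hlt : top_n < (inten.length : Int) := by omega
    have hkey : PySem.List.pyGet? (PySem.List.sorted inten (fun x => x) true) top_n
        = kthSmallest inten ((inten.length : Int) - 1 - top_n) := by
      rw [sorted_rev_eq_reverse]
      rw [PySem.List.pyGet?_of_nonneg _ h0]
      have hlen : (PySem.List.sorted inten (fun x => x) false).length = inten.length :=
        PySem.List.length_sorted _ _ _
      rw [List.getElem?_reverse (by omega)]
      rw [kth_correct inten _ (by omega) (by omega)]
      congr 1
      simp [hlen]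
      omega
    rw [hkey]
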